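-- pv_equiv track=rewrite | github.com/ComputationalChemistry-NMSU/vbt3 | examples/benzene_eta_pairing.py | double_occ
-- ===== SOURCE A (Python) =====
-- def double_occ(ds):
--     """Number of doubly-occupied sites in a vbt3 det string."""
--     occ = {}
--     for c in ds:
--         occ.setdefault(c.lower(), [False, False])
--         if c.islower():
--             occ[c.lower()][0] = True
--         else:
--             occ[c.lower()][1] = True
--     return sum(1 for ab in occ.values() if ab[0] and ab[1])
-- ===== SOURCE B (Python) =====
-- def double_occ(ds):
--     """Number of doubly-occupied sites in a vbt3 det string."""
--     sites = []
--     for c in ds: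
--         if c.lower() not in sites:
--             sites.append(c.lower())
--     return sum(1 for k in sites
--                if any(c.islower() and c.lower() == k for c in ds)
--                and any(not c.islower() and c.lower() == k for c in ds))
-- ===== Notes on version B (the rewrite author's own statement) =====
-- stated objective: alternative
-- what changed: Replaced the single-pass dict of [seen_lower, seen_upper] flag pairs by a generate-and-test scheme: first collect the distinct site keys in first-occurrence order, then for each key rescan the string twice with any() to test for a lowercase and a non-lowercase occurrence; no per-character mutable flag state is maintained.
import Mathlib
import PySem

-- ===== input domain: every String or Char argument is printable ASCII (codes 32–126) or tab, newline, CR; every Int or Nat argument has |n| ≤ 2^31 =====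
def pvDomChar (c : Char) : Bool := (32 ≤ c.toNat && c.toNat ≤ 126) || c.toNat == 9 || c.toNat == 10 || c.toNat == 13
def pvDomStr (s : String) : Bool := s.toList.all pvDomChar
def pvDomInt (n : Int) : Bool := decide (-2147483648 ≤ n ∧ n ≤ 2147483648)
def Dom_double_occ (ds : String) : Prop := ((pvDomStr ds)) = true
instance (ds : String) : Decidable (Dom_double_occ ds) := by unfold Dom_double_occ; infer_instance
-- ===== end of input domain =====

-- B replaces A's single-pass dict of [seen_lower, seen_upper] flag pairs by generate-and-test:
-- collect the distinct site keys in first-occurrence order, then rescan the string per key with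
-- two any() tests; an alternative decomposition with no per-character mutable flag state.

-- ===== PORT A =====
-- one iteration of A's `for c in ds` loop body
def doubleOccStep (occ : PySem.Dict Char (Bool × Bool)) (c : Char) :
    PySem.Dict Char (Bool × Bool) :=
  let k := PySem.Chars.lowerChar c
  let occ := occ.setdefault k (false, false)       -- occ.setdefault(c.lower(), [False, False])
  if PySem.Chars.islower c then
    occ.insert k (true, (occ.getD k (false, false)).2)     -- occ[c.lower()][0] = True
  else
    occ.insert k ((occ.getD k (false, false)).1, true)     -- occ[c.lower()][1] = True

def double_occ (ds : String) : Int :=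
  let occ := ds.toList.foldl doubleOccStep PySem.Dict.empty
  -- sum(1 for ab in occ.values() if ab[0] and ab[1])
  occ.values.foldl (fun s ab => if ab.1 && ab.2 then s + 1 else s) 0

-- ===== PORT B =====
def double_occ_alt (ds : String) : Int :=
  -- for c in ds: if c.lower() not in sites: sites.append(c.lower())
  let sites : List Char := ds.toList.foldl
    (fun s c => if s.contains (PySem.Chars.lowerChar c) then s else s ++ [PySem.Chars.lowerChar c]) []
  -- sum(1 for k in sites if any(...) and any(...))
  sites.foldl (fun n k =>
    if ds.toList.any (fun c => PySem.Chars.islower c && (PySem.Chars.lowerChar c == k)) &&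
       ds.toList.any (fun c => !PySem.Chars.islower c && (PySem.Chars.lowerChar c == k))
    then n + 1 else n) 0

-- ===== PRECONDITION & SPEC =====
def Spec_double_occ (ds : String) (out : Int) : Prop := out = double_occ_alt ds
instance (ds : String) (out : Int) : Decidable (Spec_double_occ ds out) := by unfold Spec_double_occ; infer_instance

-- ===== CLAIM (what is proved, stated in full; the proofs are below) =====
def Claim_equal_double_occ : Prop := ∀ (ds : String), Dom_double_occ ds → Spec_double_occ ds (double_occ ds)

-- ===== LEMMAS AND PROOFS =====

-- `seen lowercase with this site key` flag contributed by a character list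
def hasL (l : List Char) (k : Char) : Bool :=
  l.any (fun c => PySem.Chars.islower c && (PySem.Chars.lowerChar c == k))

-- `seen non-lowercase with this site key` flag contributed by a character list
def hasU (l : List Char) (k : Char) : Bool :=
  l.any (fun c => !PySem.Chars.islower c && (PySem.Chars.lowerChar c == k))

-- effect of one loop iteration of A on a lookup
theorem get?_doubleOccStep (d : PySem.Dict Char (Bool × Bool)) (c k : Char) :
    (doubleOccStep d c).get? k =
      if k = PySem.Chars.lowerChar c then
        some (((d.get? k).getD (false, false)).1 || PySem.Chars.islower c,
              ((d.get? k).getD (false, false)).2 || !PySem.Chars.islower c)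
      else d.get? k := by
  unfold doubleOccStep
  by_cases hl : PySem.Chars.islower c <;> by_cases hk : k = PySem.Chars.lowerChar c
  all_goals first
  | (subst hk; simp [hl, PySem.Dict.get?_setdefault_self, PySem.Dict.getD_eq_get?_getD])
  | (simp [hl, hk, PySem.Dict.get?_insert, PySem.Dict.get?_setdefault_of_ne _ _ hk])

-- characterisation of a lookup in the final dict of A's loop
theorem get?_foldl_doubleOccStep (l : List Char) (d : PySem.Dict Char (Bool × Bool)) (k : Char) :
    (l.foldl doubleOccStep d).get? k =
      match d.get? k with
      | some ab => some (ab.1 || hasL l k, ab.2 || hasU l k)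
      | none => if (l.map PySem.Chars.lowerChar).contains k then some (hasL l k, hasU l k) else none := by
  induction l generalizing d with
  | nil => cases h : d.get? k <;> simp [hasL, hasU, h]
  | cons c l ih =>
    rw [List.foldl_cons, ih, get?_doubleOccStep]
    by_cases hk : k = PySem.Chars.lowerChar c
    · have hbeq : (PySem.Chars.lowerChar c == k) = true := by simp [hk]
      cases h : d.get? k <;> simp [hasL, hasU, hk, Bool.or_assoc]
    · have hbeq : (PySem.Chars.lowerChar c == k) = false := by
        simp; exact fun h => hk h.symm
      cases h : d.get? k <;> simp [hasL, hasU, hk, hbeq]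

-- effect of one loop iteration of A on the key list
theorem keys_doubleOccStep (d : PySem.Dict Char (Bool × Bool)) (c : Char) :
    (doubleOccStep d c).keys = PySem.Set.add d.keys (PySem.Chars.lowerChar c) := by
  unfold doubleOccStep
  have hc : (d.setdefault (PySem.Chars.lowerChar c) (false, false)).contains
      (PySem.Chars.lowerChar c) = true := by
    simp [PySem.Dict.contains_setdefault]
  by_cases hl : PySem.Chars.islower c <;>
    simp only [hl, if_true, Bool.false_eq_true, if_false] <;>
    rw [PySem.Dict.keys_insert_of_contains _ _ hc, PySem.Dict.keys_setdefault,
        PySem.Set.add_eq_ite] <;>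
    by_cases hd : (PySem.Chars.lowerChar c) ∈ d.keys <;>
    simp [hd, PySem.Dict.contains_iff_mem_keys]

-- key list of the final dict of A's loop
theorem keys_foldl_doubleOccStep (l : List Char) (d : PySem.Dict Char (Bool × Bool)) :
    (l.foldl doubleOccStep d).keys = PySem.Set.update d.keys (l.map PySem.Chars.lowerChar) := by
  induction l generalizing d with
  | nil => simp [PySem.Set.update_nil]
  | cons c l ih => rw [List.foldl_cons, ih, keys_doubleOccStep, List.map_cons, PySem.Set.update_cons]

-- B's first loop builds exactly set(map(lower, l)) in first-occurrence order
theorem sites_eq_ofList (l : List Char) :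
    l.foldl (fun s c => if s.contains (PySem.Chars.lowerChar c) then s
                        else s ++ [PySem.Chars.lowerChar c]) [] =
      PySem.Set.ofList (l.map PySem.Chars.lowerChar) := by
  rw [← PySem.Set.update_nil_left, PySem.Set.update_map_eq_foldl_add]
  rfl

-- the two programs agree on the underlying character list
theorem double_occ_loop_eq (l : List Char) :
    ((l.foldl doubleOccStep PySem.Dict.empty).values.foldl
        (fun s ab => if ab.1 && ab.2 then s + 1 else s) 0 : Int) =
      (l.foldl (fun s c => if s.contains (PySem.Chars.lowerChar c) then s
                           else s ++ [PySem.Chars.lowerChar c]) []).foldl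
        (fun n k => if hasL l k && hasU l k then n + 1 else n) 0 := by
  have hkeys : (l.foldl doubleOccStep PySem.Dict.empty).keys
      = PySem.Set.ofList (l.map PySem.Chars.lowerChar) := by
    rw [keys_foldl_doubleOccStep, PySem.Dict.keys_empty, PySem.Set.update_nil_left]
  have hnd : (l.foldl doubleOccStep PySem.Dict.empty).keys.Nodup := by
    rw [hkeys]; exact PySem.Set.nodup_ofList _
  rw [PySem.List.foldl_count_if, zero_add,
    PySem.Dict.values_eq_map_keys _ hnd (false, false), List.countP_map,
    sites_eq_ofList, PySem.List.foldl_count_if, zero_add]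
  have hget : ∀ k ∈ (l.foldl doubleOccStep PySem.Dict.empty).keys,
      (l.foldl doubleOccStep PySem.Dict.empty).getD k (false, false) = (hasL l k, hasU l k) := by
    intro k hk
    rw [hkeys, PySem.Set.mem_ofList] at hk
    have hex : ∃ a ∈ l, PySem.Chars.lowerChar a = k := by simpa [List.mem_map] using hk
    rw [PySem.Dict.getD_eq_get?_getD, get?_foldl_doubleOccStep, PySem.Dict.get?_empty]
    simp [hex]
  rw [List.countP_congr (fun k hk => by rw [Function.comp_apply, hget k hk])]
  rw [hkeys]

-- ===== VERDICT (by name: the statement is the Claim_ definition above) =====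
theorem double_occ_spec : Claim_equal_double_occ := by
  intro ds _
  show double_occ ds = double_occ_alt ds
  exact double_occ_loop_eq ds.toList
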